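-- pv_equiv track=rewrite | github.com/Nilo28/Exercicios-Python---Alg.-e-Prog. | Teste.py | IdentificaDadosRepetidos
-- ===== SOURCE A (Python) =====
-- def IdentificaDadosRepetidos(Dados):    #-->Função para identificar os valores repetidos
--     Chaves = list(Dados.keys())    #-->Lista que apresenta as chaves do dicionário
--     Valores = list(Dados.values())    #-->Lista que apresenta os valores do dicionário
--     ChaveValorRepetido = []    #-->Lista que armazena as chaves dos valores repetidos
--
--     #Percorre e compara os valores do dicionario. Se for igual, salva a chave do valor repetido
--     for a in range(0, len(Dados)):
--         for b in range(a + 1, len(Dados)):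
--             if Valores[a] == Valores[b]:
--                 ChaveValorRepetido.append(Chaves[b])
--     return ChaveValorRepetido
-- ===== SOURCE B (Python) =====
-- def IdentificaDadosRepetidos(Dados):
--     # One pass: group keys by value; each position then emits the later keys of its group.
--     groups = {}
--     occ = []
--     for k, v in Dados.items():
--         lst = groups.setdefault(v, [])
--         occ.append((v, len(lst)))
--         lst.append(k)
--     out = []
--     for v, j in occ:
--         out.extend(groups[v][j + 1:])
--     return out
-- ===== Notes on version B (the rewrite author's own statement) =====
-- stated objective: faster
-- what changed: Replaces the quadratic all-pairs index scan by a single pass that groups keys by value in a dict and then emits, for each position, the later keys of its value group.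
import Mathlib
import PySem

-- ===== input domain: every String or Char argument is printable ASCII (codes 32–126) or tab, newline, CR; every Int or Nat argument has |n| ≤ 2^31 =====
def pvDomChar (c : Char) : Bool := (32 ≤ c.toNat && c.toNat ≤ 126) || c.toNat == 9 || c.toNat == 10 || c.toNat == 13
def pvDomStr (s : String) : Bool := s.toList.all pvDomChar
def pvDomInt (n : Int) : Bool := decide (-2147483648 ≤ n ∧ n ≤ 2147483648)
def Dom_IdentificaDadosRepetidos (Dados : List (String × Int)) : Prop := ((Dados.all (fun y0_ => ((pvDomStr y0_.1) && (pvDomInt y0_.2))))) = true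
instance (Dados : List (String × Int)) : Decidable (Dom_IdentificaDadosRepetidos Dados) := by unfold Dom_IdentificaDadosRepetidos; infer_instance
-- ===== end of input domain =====

-- B replaces A's quadratic all-pairs index scan by one grouping pass over the dict plus one emission pass (objective: faster, asymptotically).

-- ===== PORT A =====
def IdentificaDadosRepetidos (Dados : List (String × Int)) : List String :=
  let Chaves := Dados.map Prod.fst
  let Valores := Dados.map Prod.snd
  (PySem.List.pyRange 0 (Dados.length : Int) 1).foldl (fun acc a =>
    (PySem.List.pyRange (a + 1) (Dados.length : Int) 1).foldl (fun acc2 b =>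
      if PySem.List.pyGetD Valores a 0 = PySem.List.pyGetD Valores b 0 then
        acc2 ++ [PySem.List.pyGetD Chaves b ""]
      else acc2) acc) []

-- ===== PORT B =====
def IdentificaDadosRepetidos_alt (Dados : List (String × Int)) : List String :=
  let st := Dados.foldl
    (fun (st : PySem.Dict Int (List String) × List (Int × Int)) kv =>
      let lst := st.1.getD kv.2 []
      (st.1.modify kv.2 [] (· ++ [kv.1]), st.2 ++ [(kv.2, (lst.length : Int))]))
    (PySem.Dict.empty, [])
  st.2.foldl (fun out p =>
    out ++ PySem.List.slice (st.1.getD p.1 []) (some (p.2 + 1)) none) []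

-- ===== PRECONDITION & SPEC =====
def Spec_IdentificaDadosRepetidos (Dados : List (String × Int)) (out : List String) : Prop := out = IdentificaDadosRepetidos_alt Dados
instance (Dados : List (String × Int)) (out : List String) : Decidable (Spec_IdentificaDadosRepetidos Dados out) := by unfold Spec_IdentificaDadosRepetidos; infer_instance

-- ===== CLAIM (what is proved, stated in full; the proofs are below) =====
def Claim_equal_IdentificaDadosRepetidos : Prop := ∀ (Dados : List (String × Int)), Dom_IdentificaDadosRepetidos Dados → Spec_IdentificaDadosRepetidos Dados (IdentificaDadosRepetidos Dados)

-- ===== LEMMAS AND PROOFS =====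

-- common specification: for each position, the keys of later positions carrying the same value
def pvSpec : List (String × Int) → List String
  | [] => []
  | (_, v) :: t => ((t.filter (fun p => p.2 == v)).map Prod.fst) ++ pvSpec t

-- index access into the pair list
def pvGet (xs : List (String × Int)) (i : Int) : String × Int := PySem.List.pyGetD xs i ("", 0)

def pvInner (xs : List (String × Int)) (a : Int) : List String :=
  ((PySem.List.pyRange (a + 1) (xs.length : Int) 1).filter
      (fun b => decide ((pvGet xs a).2 = (pvGet xs b).2))).map (fun b => (pvGet xs b).1)

def pvFlat (xs : List (String × Int)) : List String :=
  (PySem.List.pyRange 0 (xs.length : Int) 1).flatMap (pvInner xs)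

lemma pv_range_shift (a b : Int) :
    PySem.List.pyRange (a + 1) (b + 1) 1 = (PySem.List.pyRange a b 1).map (· + 1) := by
  rw [PySem.List.pyRange_one, PySem.List.pyRange_one, List.map_map]
  have h : b + 1 - (a + 1) = b - a := by ring
  rw [h]
  apply List.map_congr_left
  intro k _
  simp; ring

lemma pv_get_cons (y : String × Int) (xs : List (String × Int)) (i : Int) (h : 0 ≤ i) :
    pvGet (y :: xs) (i + 1) = pvGet xs i := by
  obtain ⟨n, rfl⟩ := Int.eq_ofNat_of_zero_le h
  have h1 : ((n : Int) + 1) = ((n + 1 : Nat) : Int) := by push_cast; ring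
  unfold pvGet
  rw [h1, PySem.List.pyGetD_natCast, PySem.List.pyGetD_natCast]
  simp

lemma pv_idx_fm (xs : List (String × Int)) (q : (String × Int) → Bool) (f : (String × Int) → String) :
    ((PySem.List.pyRange 0 (xs.length : Int) 1).filter (fun b => q (pvGet xs b))).map
      (fun b => f (pvGet xs b)) = (xs.filter q).map f := by
  induction xs with
  | nil => simp
  | cons y t ih =>
    have hlen : ((y :: t).length : Int) = (t.length : Int) + 1 := by simp
    rw [hlen, PySem.List.pyRange_one_cons (by positivity)]
    have hsh : PySem.List.pyRange (0 + 1) ((t.length : Int) + 1) 1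
        = (PySem.List.pyRange 0 (t.length : Int) 1).map (· + 1) := pv_range_shift 0 _
    have h0 : pvGet (y :: t) 0 = y := by simp [pvGet, PySem.List.pyGetD_zero_cons]
    have htail :
        ((PySem.List.pyRange (0 + 1) ((t.length : Int) + 1) 1).filter
            (fun b => q (pvGet (y :: t) b))).map (fun b => f (pvGet (y :: t) b))
        = (t.filter q).map f := by
      rw [hsh, List.filter_map, List.map_map]
      have hf : (PySem.List.pyRange 0 (t.length : Int) 1).filter
            ((fun b => q (pvGet (y :: t) b)) ∘ (· + 1))
          = (PySem.List.pyRange 0 (t.length : Int) 1).filter (fun b => q (pvGet t b)) := by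
        apply List.filter_congr
        intro b hb
        have hb0 : 0 ≤ b := (PySem.List.mem_pyRange_one.mp hb).1
        simp [Function.comp, pv_get_cons y t b hb0]
      rw [hf]
      have hm : ((PySem.List.pyRange 0 (t.length : Int) 1).filter
            (fun b => q (pvGet t b))).map ((fun b => f (pvGet (y :: t) b)) ∘ (· + 1))
          = ((PySem.List.pyRange 0 (t.length : Int) 1).filter
            (fun b => q (pvGet t b))).map (fun b => f (pvGet t b)) := by
        apply List.map_congr_left
        intro b hb
        have hb0 : 0 ≤ b := (PySem.List.mem_pyRange_one.mp (List.mem_of_mem_filter hb)).1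
        simp [Function.comp, pv_get_cons y t b hb0]
      rw [hm, ih]
    rw [List.filter_cons]
    by_cases hq : q y
    · rw [if_pos (by rw [h0]; exact hq), List.map_cons, htail, h0]
      simp [hq]
    · rw [if_neg (by rw [h0]; simpa using hq), htail]
      simp [hq]

lemma pv_inner_shift (y : String × Int) (xs : List (String × Int)) (a : Int) (h : 0 ≤ a) :
    pvInner (y :: xs) (a + 1) = pvInner xs a := by
  unfold pvInner
  have hlen : ((y :: xs).length : Int) = (xs.length : Int) + 1 := by simp
  rw [hlen]
  have hsh : PySem.List.pyRange (a + 1 + 1) ((xs.length : Int) + 1) 1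
      = (PySem.List.pyRange (a + 1) (xs.length : Int) 1).map (· + 1) := pv_range_shift _ _
  rw [hsh, List.filter_map, List.map_map]
  have ha : pvGet (y :: xs) (a + 1) = pvGet xs a := pv_get_cons y xs a h
  have hf : (PySem.List.pyRange (a + 1) (xs.length : Int) 1).filter
        ((fun b => decide ((pvGet (y :: xs) (a + 1)).2 = (pvGet (y :: xs) b).2)) ∘ (· + 1))
      = (PySem.List.pyRange (a + 1) (xs.length : Int) 1).filter
        (fun b => decide ((pvGet xs a).2 = (pvGet xs b).2)) := by
    apply List.filter_congr
    intro b hb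
    have hb0 : 0 ≤ b := le_trans (by omega) (PySem.List.mem_pyRange_one.mp hb).1
    simp [Function.comp, ha, pv_get_cons y xs b hb0]
  rw [hf]
  apply List.map_congr_left
  intro b hb
  have hb0 : 0 ≤ b := le_trans (by omega) (PySem.List.mem_pyRange_one.mp (List.mem_of_mem_filter hb)).1
  simp [Function.comp, pv_get_cons y xs b hb0]

lemma pv_inner_zero (y : String × Int) (xs : List (String × Int)) :
    pvInner (y :: xs) 0 = (xs.filter (fun p => p.2 == y.2)).map Prod.fst := by
  unfold pvInner
  have hlen : ((y :: xs).length : Int) = (xs.length : Int) + 1 := by simp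
  rw [hlen]
  have hsh : PySem.List.pyRange (0 + 1) ((xs.length : Int) + 1) 1
      = (PySem.List.pyRange 0 (xs.length : Int) 1).map (· + 1) := pv_range_shift 0 _
  rw [hsh, List.filter_map, List.map_map]
  have h0 : pvGet (y :: xs) 0 = y := by simp [pvGet, PySem.List.pyGetD_zero_cons]
  have hf : (PySem.List.pyRange 0 (xs.length : Int) 1).filter
        ((fun b => decide ((pvGet (y :: xs) 0).2 = (pvGet (y :: xs) b).2)) ∘ (· + 1))
      = (PySem.List.pyRange 0 (xs.length : Int) 1).filter
        (fun b => (pvGet xs b).2 == y.2) := by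
    apply List.filter_congr
    intro b hb
    have hb0 : 0 ≤ b := (PySem.List.mem_pyRange_one.mp hb).1
    have hbd : ∀ (u w : Int), decide (w = u) = (u == w) := by
      intro u w
      by_cases h : w = u
      · subst h; simp
      · rw [decide_eq_false h]
        symm
        rw [beq_eq_false_iff_ne]
        exact fun h' => h h'.symm
    simp only [Function.comp, h0, pv_get_cons y xs b hb0, hbd]
  rw [hf]
  have hm : ((PySem.List.pyRange 0 (xs.length : Int) 1).filter
        (fun b => (pvGet xs b).2 == y.2)).map ((fun b => (pvGet (y :: xs) b).1) ∘ (· + 1))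
      = ((PySem.List.pyRange 0 (xs.length : Int) 1).filter
        (fun b => (pvGet xs b).2 == y.2)).map (fun b => (pvGet xs b).1) := by
    apply List.map_congr_left
    intro b hb
    have hb0 : 0 ≤ b := (PySem.List.mem_pyRange_one.mp (List.mem_of_mem_filter hb)).1
    simp [Function.comp, pv_get_cons y xs b hb0]
  rw [hm]
  exact pv_idx_fm xs (fun p => p.2 == y.2) Prod.fst

lemma pv_flat_eq_spec (xs : List (String × Int)) : pvFlat xs = pvSpec xs := by
  induction xs with
  | nil => simp [pvFlat, pvSpec]
  | cons y t ih =>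
    unfold pvFlat
    have hlen : ((y :: t).length : Int) = (t.length : Int) + 1 := by simp
    rw [hlen, PySem.List.pyRange_one_cons (by positivity), List.flatMap_cons]
    have hsh : PySem.List.pyRange (0 + 1) ((t.length : Int) + 1) 1
        = (PySem.List.pyRange 0 (t.length : Int) 1).map (· + 1) := pv_range_shift 0 _
    have htail : (PySem.List.pyRange (0 + 1) ((t.length : Int) + 1) 1).flatMap (pvInner (y :: t))
        = pvFlat t := by
      rw [hsh, List.flatMap_map]
      unfold pvFlat
      apply List.flatMap_congr 
      intro b hb
      have hb0 : 0 ≤ b := (PySem.List.mem_pyRange_one.mp hb).1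
      exact pv_inner_shift y t b hb0
    rw [htail, pv_inner_zero, ih]
    rfl

-- the A port computes pvFlat
lemma pvA_eq_flat (Dados : List (String × Int)) : IdentificaDadosRepetidos Dados = pvFlat Dados := by
  have hK : ∀ b : Int, PySem.List.pyGetD (Dados.map Prod.fst) b "" = (pvGet Dados b).1 := by
    intro b
    simpa [pvGet] using PySem.List.pyGetD_map Prod.fst Dados b (("", 0) : String × Int)
  have hV : ∀ b : Int, PySem.List.pyGetD (Dados.map Prod.snd) b 0 = (pvGet Dados b).2 := by
    intro b
    simpa [pvGet] using PySem.List.pyGetD_map Prod.snd Dados b (("", 0) : String × Int)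
  simp only [IdentificaDadosRepetidos, hK, hV]
  simp only [PySem.List.foldl_append_ite]
  rw [PySem.List.foldl_append_eq_flatMap]
  simp only [List.nil_append]
  rfl

-- ===== B side =====
def pvFoldG (xs : List (String × Int)) (d : PySem.Dict Int (List String)) : PySem.Dict Int (List String) :=
  xs.foldl (fun d kv => d.modify kv.2 [] (· ++ [kv.1])) d

def pvOccL : List (String × Int) → PySem.Dict Int (List String) → List (Int × Int)
  | [], _ => []
  | (k, v) :: t, d => (v, ((d.getD v []).length : Int)) :: pvOccL t (d.modify v [] (· ++ [k]))

lemma pv_fold_pair (xs : List (String × Int)) :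
    ∀ (d : PySem.Dict Int (List String)) (o : List (Int × Int)),
    xs.foldl (fun (st : PySem.Dict Int (List String) × List (Int × Int)) kv =>
        (st.1.modify kv.2 [] (· ++ [kv.1]), st.2 ++ [(kv.2, ((st.1.getD kv.2 []).length : Int))]))
      (d, o) = (pvFoldG xs d, o ++ pvOccL xs d) := by
  induction xs with
  | nil => intro d o; simp [pvFoldG, pvOccL]
  | cons y t ih =>
    intro d o
    obtain ⟨k, v⟩ := y
    simp only [List.foldl_cons, pvFoldG, pvOccL]
    rw [ih]
    simp [pvFoldG, List.append_assoc]

lemma pv_groups (xs : List (String × Int)) (d : PySem.Dict Int (List String)) (c : Int) :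
    (pvFoldG xs d).getD c [] = d.getD c [] ++ (xs.filter (fun p => p.2 == c)).map Prod.fst := by
  unfold pvFoldG
  have h : xs.foldl (fun d kv => d.modify kv.2 [] (· ++ [kv.1])) d
      = (xs.map Prod.swap).foldl (fun d p => d.modify p.1 [] (· ++ [p.2])) d := by
    rw [List.foldl_map]
    simp
  rw [h, PySem.Dict.getD_foldl_modify_append]
  congr 1
  rw [List.filter_map, List.map_map]
  congr 1

lemma pv_occ_flat (s : List (String × Int)) :
    ∀ (g G : PySem.Dict Int (List String)),
    (∀ v, G.getD v [] = g.getD v [] ++ (s.filter (fun p => p.2 == v)).map Prod.fst) →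
    (pvOccL s g).flatMap (fun p => PySem.List.slice (G.getD p.1 []) (some (p.2 + 1)) none)
      = pvSpec s := by
  induction s with
  | nil => intro g G _; simp [pvOccL, pvSpec]
  | cons y t ih =>
    intro g G hG
    obtain ⟨k, v⟩ := y
    simp only [pvOccL, List.flatMap_cons, pvSpec]
    have hv := hG v
    simp at hv
    have hlen : (((g.getD v []).length : Int) + 1) = (((g.getD v []).length + 1 : Nat) : Int) := by
      push_cast; ring
    have hslice : PySem.List.slice (G.getD v []) (some (((g.getD v []).length : Int) + 1)) none
        = (t.filter (fun p => p.2 == v)).map Prod.fst := by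
      rw [hlen, PySem.List.slice_from_natCast, hv]
      simp
    rw [hslice]
    congr 1
    apply ih
    intro v'
    by_cases hvv : v' = v
    · subst hvv
      rw [PySem.Dict.getD_modify]
      simp [hv]
    · rw [PySem.Dict.getD_modify]
      rw [if_neg hvv]
      have := hG v'
      simp only [List.filter_cons] at this
      rw [this]
      have hbeq : (v == v') = false := by
        rw [beq_eq_false_iff_ne]; exact fun h => hvv h.symm
      simp [hbeq]

lemma pvB_eq_spec (Dados : List (String × Int)) : IdentificaDadosRepetidos_alt Dados = pvSpec Dados := by
  simp only [IdentificaDadosRepetidos_alt]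
  rw [pv_fold_pair Dados PySem.Dict.empty []]
  simp only [List.nil_append]
  rw [PySem.List.foldl_append_eq_flatMap]
  simp only [List.nil_append]
  apply pv_occ_flat
  intro v
  rw [pv_groups]

-- ===== VERDICT (by name: the statement is the Claim_ definition above) =====
theorem IdentificaDadosRepetidos_spec : Claim_equal_IdentificaDadosRepetidos := by
  intro Dados _
  unfold Spec_IdentificaDadosRepetidos
  rw [pvA_eq_flat, pv_flat_eq_spec, pvB_eq_spec]
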